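-- pv_equiv track=rewrite | github.com/MizaGBF/MizaBOT | cogs/granblue.py | fixCase
-- ===== SOURCE A (Python) =====
-- def fixCase(term): # term is a string
--     fixed = ""
--     up = False
--     if term.lower() == "and": # if it's just 'and', we don't don't fix anything and return a lowercase 'and'
--         return "and"
--     elif term.lower() == "of":
--         return "of"
--     elif term.lower() == "(sr)":
--         return "(SR)"
--     elif term.lower() == "(ssr)":
--         return "(SSR)"
--     elif term.lower() == "(r)":
--         return "(R)"
--     for i in range(0, len(term)): # for each character
--         if term[i].isalpha(): # if letter
--             if term[i].isupper(): # is uppercase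
--                 if not up: # we haven't encountered an uppercase letter
--                     up = True
--                     fixed += term[i] # save
--                 else: # we have
--                     fixed += term[i].lower() # make it lowercase and save
--             elif term[i].islower(): # is lowercase
--                 if not up: # we haven't encountered an uppercase letter
--                     fixed += term[i].upper() # make it uppercase and save
--                     up = True
--                 else: # we have
--                     fixed += term[i] # save
--             else: # other characters
--                 fixed += term[i] # we just save
--         elif term[i] == "/" or term[i] == ":" or term[i] == "#" or term[i] == "-": # we reset the uppercase detection if we encounter those
--             up = False
--             fixed += term[i]
--         else: # everything else,
--             fixed += term[i] # we save
--     return fixed # return the result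
-- ===== SOURCE B (Python) =====
-- _SPECIALS = {"and": "and", "of": "of", "(sr)": "(SR)", "(ssr)": "(SSR)", "(r)": "(R)"}
-- _DELIMS = "/:#-"
--
-- def _splitKeep(term):
--     # break term into alternating non-delimiter segments and single delimiter chars
--     pieces = []
--     cur = []
--     for c in term:
--         if c in _DELIMS:
--             pieces.append("".join(cur))
--             pieces.append(c)
--             cur = []
--         else:
--             cur.append(c)
--     pieces.append("".join(cur))
--     return pieces
--
-- def _titleSegment(seg):
--     # uppercase the first alphabetic char, lowercase every later one, per character
--     res = []
--     seen = False
--     for c in seg: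
--         if c.isalpha():
--             if seen:
--                 res.append(c.lower())
--             else:
--                 res.append(c.upper())
--                 seen = True
--         else:
--             res.append(c)
--     return "".join(res)
--
-- def fixCase(term):
--     special = _SPECIALS.get(term.lower())
--     if special is not None:
--         return special
--     return "".join(_titleSegment(p) for p in _splitKeep(term))
-- ===== Notes on version B (the rewrite author's own statement) =====
-- stated objective: alternative
-- what changed: Replaces A's single stateful scan with a first-letter flag reset at delimiters by a split-then-map decomposition: the term is split at [/:#-] into segments (keeping the delimiters), each segment is title-cased independently per character, and the pieces are concatenated; the five whole-term special cases become one dict lookup.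
import Mathlib
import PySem

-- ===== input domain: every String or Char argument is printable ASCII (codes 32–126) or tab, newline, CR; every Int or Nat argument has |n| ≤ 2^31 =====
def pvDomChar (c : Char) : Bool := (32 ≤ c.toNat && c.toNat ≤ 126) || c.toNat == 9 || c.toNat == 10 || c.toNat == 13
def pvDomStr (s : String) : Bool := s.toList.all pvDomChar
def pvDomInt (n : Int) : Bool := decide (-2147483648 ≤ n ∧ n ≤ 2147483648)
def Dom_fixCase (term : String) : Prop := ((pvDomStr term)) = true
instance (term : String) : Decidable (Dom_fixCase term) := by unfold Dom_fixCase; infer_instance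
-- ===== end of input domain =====

-- B replaces A's single stateful scan (a first-letter flag reset at delimiters) by splitting the term
-- at the delimiters [/:#-] and title-casing each segment independently (objective: alternative).

-- ===== PORT A =====
-- one step of A's loop body: state = (fixed so far, up flag)
def fixCaseStep (st : List Char × Bool) (c : Char) : List Char × Bool :=
  if PySem.Chars.isalpha c then
    if PySem.Chars.isupper c then
      if !st.2 then (st.1 ++ [c], true)
      else (st.1 ++ [PySem.Chars.lowerChar c], st.2)
    else if PySem.Chars.islower c then
      if !st.2 then (st.1 ++ [PySem.Chars.upperChar c], true)
      else (st.1 ++ [c], st.2)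
    else (st.1 ++ [c], st.2)
  else if c = '/' ∨ c = ':' ∨ c = '#' ∨ c = '-' then (st.1 ++ [c], false)
  else (st.1 ++ [c], st.2)

def fixCase (term : String) : String :=
  if PySem.Str.lower term = "and" then "and"
  else if PySem.Str.lower term = "of" then "of"
  else if PySem.Str.lower term = "(sr)" then "(SR)"
  else if PySem.Str.lower term = "(ssr)" then "(SSR)"
  else if PySem.Str.lower term = "(r)" then "(R)"
  else String.ofList (term.toList.foldl fixCaseStep ([], false)).1

-- ===== PORT B =====
def pvSpecials : PySem.Dict String String :=
  PySem.Dict.ofList [("and", "and"), ("of", "of"), ("(sr)", "(SR)"), ("(ssr)", "(SSR)"), ("(r)", "(R)")]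

def pvDelims : List Char := ['/', ':', '#', '-']

-- _splitKeep: alternating non-delimiter segments and single delimiter chars
def pvSplitKeep : List Char → List Char → List (List Char)
  | [], cur => [cur]
  | c :: rest, cur =>
    if c ∈ pvDelims then cur :: [c] :: pvSplitKeep rest []
    else pvSplitKeep rest (cur ++ [c])

-- _titleSegment: uppercase the first alphabetic char, lowercase the later ones
def pvTitleSeg : Bool → List Char → List Char
  | _, [] => []
  | seen, c :: cs =>
    if PySem.Chars.isalpha c then
      if seen then PySem.Chars.lowerChar c :: pvTitleSeg true cs
      else PySem.Chars.upperChar c :: pvTitleSeg true cs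
    else c :: pvTitleSeg seen cs

def fixCase_alt (term : String) : String :=
  match PySem.Dict.get? pvSpecials (PySem.Str.lower term) with
  | some s => s
  | none => String.ofList (((pvSplitKeep term.toList []).map (pvTitleSeg false)).flatten)

-- ===== PRECONDITION & SPEC =====
def Spec_fixCase (term : String) (out : String) : Prop := out = fixCase_alt term
instance (term : String) (out : String) : Decidable (Spec_fixCase term out) := by unfold Spec_fixCase; infer_instance

-- ===== CLAIM (what is proved, stated in full; the proofs are below) =====
def Claim_equal_fixCase : Prop := ∀ (term : String), Dom_fixCase term → Spec_fixCase term (fixCase term)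

-- ===== LEMMAS AND PROOFS =====

-- common reference form of the scan: (result, final flag)
def pvRefP : Bool → List Char → List Char × Bool
  | up, [] => ([], up)
  | up, c :: cs =>
    if c = '/' ∨ c = ':' ∨ c = '#' ∨ c = '-' then
      ((c :: (pvRefP false cs).1), (pvRefP false cs).2)
    else if PySem.Chars.isalpha c then
      (((if up then PySem.Chars.lowerChar c else PySem.Chars.upperChar c) :: (pvRefP true cs).1), (pvRefP true cs).2)
    else ((c :: (pvRefP up cs).1), (pvRefP up cs).2)

theorem pv_upper_fix (c : Char) (h : PySem.Chars.isupper c = true) :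
    PySem.Chars.islower c = false ∧ PySem.Chars.upperChar c = c := by
  have hl : PySem.Chars.islower c = false := by
    simp [PySem.Chars.isupper, Char.le_def, UInt32.le_iff_toNat_le] at h
    simp [PySem.Chars.islower, Char.le_def, UInt32.le_iff_toNat_le]
    intro h1; omega
  exact ⟨hl, by simp [PySem.Chars.upperChar, hl]⟩

theorem pv_lower_fix (c : Char) (h : PySem.Chars.islower c = true) :
    PySem.Chars.isupper c = false ∧ PySem.Chars.lowerChar c = c := by
  have hu : PySem.Chars.isupper c = false := by
    simp [PySem.Chars.islower, Char.le_def, UInt32.le_iff_toNat_le] at h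
    simp [PySem.Chars.isupper, Char.le_def, UInt32.le_iff_toNat_le]
    intro h1; omega
  exact ⟨hu, by simp [PySem.Chars.lowerChar, hu]⟩

theorem pv_foldA (cs : List Char) : ∀ (fixed : List Char) (up : Bool),
    cs.foldl fixCaseStep (fixed, up) = (fixed ++ (pvRefP up cs).1, (pvRefP up cs).2) := by
  induction cs with
  | nil => intro fixed up; simp [pvRefP]
  | cons c cs ih =>
    intro fixed up
    by_cases hd : c = '/' ∨ c = ':' ∨ c = '#' ∨ c = '-'
    · have ha : PySem.Chars.isalpha c = false := by
        rcases hd with h | h | h | h <;> subst h <;> decide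
      simp only [List.foldl_cons, fixCaseStep, ha, hd, if_true, if_false, Bool.false_eq_true]
      rw [ih]
      simp [pvRefP, hd]
    · by_cases hu : PySem.Chars.isupper c = true
      · obtain ⟨hl, he⟩ := pv_upper_fix c hu
        have ha : PySem.Chars.isalpha c = true := by simp [PySem.Chars.isalpha, hu]
        cases up <;>
          simp only [List.foldl_cons, fixCaseStep, ha, hu, hl, if_true,
            Bool.not_false, Bool.not_true] <;> rw [ih] <;> simp [pvRefP, hd, ha, he]
      · by_cases hlo : PySem.Chars.islower c = true
        · obtain ⟨hu', he⟩ := pv_lower_fix c hlo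
          have ha : PySem.Chars.isalpha c = true := by simp [PySem.Chars.isalpha, hlo]
          cases up <;>
            simp only [List.foldl_cons, fixCaseStep, ha, hlo, hu', if_true,
              Bool.not_false, Bool.not_true] <;> rw [ih] <;> simp [pvRefP, hd, ha, he]
        · have ha : PySem.Chars.isalpha c = false := by
            simp [PySem.Chars.isalpha]
            exact ⟨by simpa using hu, by simpa using hlo⟩
          simp only [List.foldl_cons, fixCaseStep, ha, hd, Bool.false_eq_true, ite_false]
          rw [ih]
          simp [pvRefP, hd, ha]

theorem pv_splitKeep_acc (cs : List Char) :
    ∃ p ps, ∀ cur, pvSplitKeep cs cur = (cur ++ p) :: ps := by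
  induction cs with
  | nil => exact ⟨[], [], by intro cur; simp [pvSplitKeep]⟩
  | cons c rest ih =>
    obtain ⟨p, ps, hp⟩ := ih
    by_cases hd : c ∈ pvDelims
    · exact ⟨[], [c] :: pvSplitKeep rest [], by intro cur; simp [pvSplitKeep, hd]⟩
    · refine ⟨c :: p, ps, ?_⟩
      intro cur
      simp [pvSplitKeep, hd, hp (cur ++ [c])]

theorem pv_flatB (cs : List Char) : ∀ (seen : Bool) p ps, pvSplitKeep cs [] = p :: ps →
    pvTitleSeg seen p ++ (ps.map (pvTitleSeg false)).flatten = (pvRefP seen cs).1 := by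
  induction cs with
  | nil =>
    intro seen p ps h
    simp [pvSplitKeep] at h
    obtain ⟨h1, h2⟩ := h
    subst h1; subst h2
    simp [pvTitleSeg, pvRefP]
  | cons c rest ih =>
    intro seen p ps h
    by_cases hd : c ∈ pvDelims
    · have hd' : c = '/' ∨ c = ':' ∨ c = '#' ∨ c = '-' := by
        simpa [pvDelims] using hd
      have ha : PySem.Chars.isalpha c = false := by
        rcases hd' with h' | h' | h' | h' <;> subst h' <;> decide
      simp [pvSplitKeep, hd] at h
      obtain ⟨h1, h2⟩ := h
      subst h1; subst h2
      obtain ⟨p', ps', hp'⟩ := pv_splitKeep_acc rest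
      rw [hp' []]
      simp only [List.map_cons, List.flatten_cons, pvTitleSeg, ha, Bool.false_eq_true, if_false]
      simp only [List.nil_append]
      rw [ih false p' ps' (by simpa using hp' [])]
      simp [pvRefP, hd']
    · have hd' : ¬ (c = '/' ∨ c = ':' ∨ c = '#' ∨ c = '-') := by
        simpa [pvDelims] using hd
      obtain ⟨p', ps', hp'⟩ := pv_splitKeep_acc rest
      have h' : pvSplitKeep (c :: rest) [] = (c :: p') :: ps' := by
        simp [pvSplitKeep, hd, hp' [c]]
      rw [h'] at h
      injection h with h1 h2
      subst h1; subst h2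
      by_cases ha : PySem.Chars.isalpha c = true
      · cases seen <;>
          simp only [pvTitleSeg, ha, if_true, Bool.false_eq_true, if_false, List.cons_append] <;>
          rw [ih true p' ps' (by simpa using hp' [])] <;>
          simp [pvRefP, hd', ha]
      · simp only [pvTitleSeg, ha, Bool.false_eq_true, if_false, List.cons_append]
        rw [ih seen p' ps' (by simpa using hp' [])]
        simp [pvRefP, hd', ha]

theorem pv_get_none (low : String) (h1 : ¬ low = "and") (h2 : ¬ low = "of") (h3 : ¬ low = "(sr)")
    (h4 : ¬ low = "(ssr)") (h5 : ¬ low = "(r)") : PySem.Dict.get? pvSpecials low = none := by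
  have hit : pvSpecials.items =
      [("and", "and"), ("of", "of"), ("(sr)", "(SR)"), ("(ssr)", "(SSR)"), ("(r)", "(R)")] := rfl
  have e1 : (("and" : String) == low) = false := beq_eq_false_iff_ne.mpr (fun h => h1 h.symm)
  have e2 : (("of" : String) == low) = false := beq_eq_false_iff_ne.mpr (fun h => h2 h.symm)
  have e3 : (("(sr)" : String) == low) = false := beq_eq_false_iff_ne.mpr (fun h => h3 h.symm)
  have e4 : (("(ssr)" : String) == low) = false := beq_eq_false_iff_ne.mpr (fun h => h4 h.symm)
  have e5 : (("(r)" : String) == low) = false := beq_eq_false_iff_ne.mpr (fun h => h5 h.symm)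
  simp [PySem.Dict.get?, hit, List.find?]
  simp [e1, e2, e3, e4, e5]

-- ===== VERDICT (by name: the statement is the Claim_ definition above) =====
theorem fixCase_spec : Claim_equal_fixCase := by
  intro term _hdom
  unfold Spec_fixCase fixCase fixCase_alt
  by_cases h1 : PySem.Str.lower term = "and"
  · rw [h1]; rfl
  · by_cases h2 : PySem.Str.lower term = "of"
    · rw [h2]; rfl
    · by_cases h3 : PySem.Str.lower term = "(sr)"
      · rw [h3]; rfl
      · by_cases h4 : PySem.Str.lower term = "(ssr)"
        · rw [h4]; rfl
        · by_cases h5 : PySem.Str.lower term = "(r)"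
          · rw [h5]; rfl
          · rw [if_neg h1, if_neg h2, if_neg h3, if_neg h4, if_neg h5,
              pv_get_none _ h1 h2 h3 h4 h5]
            rw [pv_foldA term.toList [] false]
            obtain ⟨p, ps, hp⟩ := pv_splitKeep_acc term.toList
            have hs : pvSplitKeep term.toList [] = p :: ps := by simpa using hp []
            rw [hs]
            simp only [List.map_cons, List.flatten_cons, List.nil_append]
            rw [pv_flatB term.toList false p ps hs]
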